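-- pv_equiv track=rewrite | github.com/Domurba/Codewars_katas | python/6_kyu/Highest_Scoring_Word--by_Kolhelma--.py | high
-- ===== SOURCE A (Python) =====
-- def high(x):
--     x = x.split()
--     sums = []
--     for i in x:
--         s = 0
--         for l in i:
--             s += ord(l) - 96
--         sums.append(s)
--     return (x[sums.index(max(sums))])
-- ===== SOURCE B (Python) =====
-- def high(x):
--     # Single character-level scan: no split(), no word list, no score list.
--     # Maintain the current word and its score; on whitespace flush it against
--     # the running best (strict '>' keeps the first word on ties, like A).
--     best = None  # (score, word) of the best word seen so far
--     cur, cur_score = "", 0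
--     for c in x + " ":
--         if c.isspace():
--             if cur:
--                 if best is None or cur_score > best[0]:
--                     best = (cur_score, cur)
--             cur, cur_score = "", 0
--         else:
--             cur += c
--             cur_score += ord(c) - 96
--     return best[1]
-- ===== Notes on version B (the rewrite author's own statement) =====
-- stated objective: alternative
-- what changed: B never calls split() and builds no word or score list: it makes one character-level pass over the string, accumulating the current word and its score and flushing it against a single running (score, word) best at each whitespace boundary.
import Mathlib
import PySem

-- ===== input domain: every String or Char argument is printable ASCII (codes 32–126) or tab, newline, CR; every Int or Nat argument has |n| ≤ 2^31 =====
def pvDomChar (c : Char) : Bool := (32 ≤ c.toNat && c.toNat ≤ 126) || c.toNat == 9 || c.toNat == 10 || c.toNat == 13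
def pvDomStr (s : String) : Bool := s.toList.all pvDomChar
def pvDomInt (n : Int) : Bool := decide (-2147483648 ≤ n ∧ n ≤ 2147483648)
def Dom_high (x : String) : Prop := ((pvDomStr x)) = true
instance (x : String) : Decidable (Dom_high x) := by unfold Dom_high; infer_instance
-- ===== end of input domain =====

-- B makes one character-level pass with a running (score, word) best: no split(),
-- no word list, no score list, no index() re-scan.

-- ===== PORT A =====
def high (x : String) : String :=
  let ws := PySem.Str.split₀ x
  let sums : List Int := ws.foldl
    (fun sums i => sums ++ [i.toList.foldl (fun s l => s + ((l.toNat : Int) - 96)) 0]) []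
  match PySem.List.max? sums (fun v => v) with   -- max(sums): ValueError on empty, excluded by Pre_
  | none => ""
  | some m =>
    match PySem.List.index? sums m with
    | none => ""                                  -- unreachable: m ∈ sums
    | some k => (PySem.List.pyGet? ws (k : Int)).getD ""   -- unreachable default: k < ws.length

-- ===== PORT B =====
-- the loop body of Source B's scan: state = (best (score, word) or none, current word, current score)
def scanStep (st : Option (Int × List Char) × List Char × Int) (c : Char) :
    Option (Int × List Char) × List Char × Int :=
  if PySem.Chars.isspace c then
    if st.2.1 ≠ [] then
      (match st.1 with
       | none => some (st.2.2, st.2.1)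
       | some (bs, bw) => if bs < st.2.2 then some (st.2.2, st.2.1) else some (bs, bw),
       [], 0)
    else (st.1, [], 0)
  else (st.1, st.2.1 ++ [c], st.2.2 + ((c.toNat : Int) - 96))

def high_alt (x : String) : String :=
  match ((x.toList ++ [' ']).foldl scanStep (none, [], 0)).1 with
  | none => ""                                    -- best[1] of None: TypeError, excluded by Pre_
  | some (_, w) => String.ofList w

-- ===== PRECONDITION & SPEC =====
-- A raises ValueError (max of empty sequence) and B raises TypeError (best is None)
-- when x contains no word; those inputs are excluded.
def Pre_high (x : String) : Prop := PySem.Str.split₀ x ≠ []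
instance (x : String) : Decidable (Pre_high x) := by unfold Pre_high; infer_instance
def pvWitness_high : String := "aa b"
def Spec_high (x : String) (out : String) : Prop := out = high_alt x
instance (x : String) (out : String) : Decidable (Spec_high x out) := by unfold Spec_high; infer_instance

-- ===== CLAIM (what is proved, stated in full; the proofs are below) =====
def Claim_equal_high : Prop := ∀ (x : String), Dom_high x → Pre_high x → Spec_high x (high x)

-- ===== LEMMAS AND PROOFS =====

def charsScore (w : List Char) : Int := (w.map (fun c => (c.toNat : Int) - 96)).sum

def highScore (w : String) : Int := charsScore w.toList

-- the words Source B's scan will still produce, given the partial word `cur` in hand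
def wordsFrom (cur : List Char) : List Char → List (List Char)
  | [] => if cur = [] then [] else [cur]
  | c :: rest =>
      if PySem.Chars.isspace c then
        (if cur = [] then wordsFrom [] rest else cur :: wordsFrom [] rest)
      else wordsFrom (cur ++ [c]) rest

-- the running-best recurrence Source B's flushes implement, word by word
def runBest (best : Option (Int × List Char)) : List (List Char) → Option (Int × List Char)
  | [] => best
  | w :: ws =>
      runBest (some (match best with
        | none => (charsScore w, w)
        | some (bs, bw) => if bs < charsScore w then (charsScore w, w) else (bs, bw))) ws

theorem charsScore_nil : charsScore [] = 0 := rfl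

theorem charsScore_append (w : List Char) (c : Char) :
    charsScore (w ++ [c]) = charsScore w + ((c.toNat : Int) - 96) := by
  simp [charsScore]

-- A's per-word inner loop computes the word's score.
theorem score_eq (w : String) :
    w.toList.foldl (fun s l => s + ((l.toNat : Int) - 96)) 0 = highScore w := by
  unfold highScore charsScore
  induction w.toList using List.reverseRecOn with
  | nil => simp
  | append_singleton t c ih => simp [List.foldl_append, ih]

-- B's character scan computes the running best over the remaining words.
theorem scan_eq (cs : List Char) (best : Option (Int × List Char)) (cur : List Char) :
    ((cs ++ [' ']).foldl scanStep (best, cur, charsScore cur)).1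
      = runBest best (wordsFrom cur cs) := by
  have hs : PySem.Chars.isspace ' ' = true := by decide
  induction cs generalizing best cur with
  | nil =>
      by_cases h : cur = []
      · simp [scanStep, wordsFrom, runBest, h, hs]
      · simp [scanStep, wordsFrom, runBest, h, hs]
        cases best with
        | none => rfl
        | some b => cases b with | mk bs bw => by_cases hlt : bs < charsScore cur <;> simp [hlt]
  | cons c rest ih =>
      by_cases hsp : PySem.Chars.isspace c = true
      · by_cases h : cur = []
        · have := ih best []
          simpa [scanStep, wordsFrom, hsp, h, charsScore_nil] using this
        · cases best with
          | none =>
              have := ih (some (charsScore cur, cur)) []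
              simpa [scanStep, wordsFrom, runBest, hsp, h, charsScore_nil] using this
          | some b =>
              cases b with
              | mk bs bw =>
                  have := ih (some (if bs < charsScore cur then (charsScore cur, cur) else (bs, bw))) []
                  by_cases hlt : bs < charsScore cur <;>
                    simpa [scanStep, wordsFrom, runBest, hsp, h, hlt, charsScore_nil] using this
      · have := ih best (cur ++ [c])
        simpa [scanStep, wordsFrom, hsp, charsScore_append] using this

-- split₀'s scanner produces exactly wordsFrom.
theorem split₀_go_eq (cs : List Char) (curRev : List Char) (acc : List (List Char)) :
    PySem.Chars.split₀.go cs curRev acc = acc.reverse ++ wordsFrom curRev.reverse cs := by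
  induction cs generalizing curRev acc with
  | nil =>
      by_cases h : curRev = [] <;>
        simp [PySem.Chars.split₀.go, wordsFrom, h, List.isEmpty_iff]
  | cons c rest ih =>
      by_cases hsp : PySem.Chars.isspace c = true
      · by_cases h : curRev = []
        · simp [PySem.Chars.split₀.go, wordsFrom, hsp, h, ih [] acc]
        · have hrev : curRev.reverse ≠ [] := by simpa using h
          simp [PySem.Chars.split₀.go, wordsFrom, hsp, h, List.isEmpty_iff, hrev,
            ih [] (curRev.reverse :: acc)]
      · simp [PySem.Chars.split₀.go, wordsFrom, hsp, ih (c :: curRev) acc]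

theorem split₀_eq_wordsFrom (cs : List Char) :
    PySem.Chars.split₀ cs = wordsFrom [] cs := by
  simpa using split₀_go_eq cs [] []

-- the running best, started from a first word, is the pick-the-first-strict-max fold
theorem runBest_some (ws : List (List Char)) (b : List Char) :
    runBest (some (charsScore b, b)) ws
      = some (charsScore (ws.foldl (fun b x => if charsScore b < charsScore x then x else b) b),
              ws.foldl (fun b x => if charsScore b < charsScore x then x else b) b) := by
  induction ws generalizing b with
  | nil => rfl
  | cons x t ih =>
      by_cases h : charsScore b < charsScore x
      · simpa [runBest, h] using ih x
      · simpa [runBest, h] using ih b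

-- the Chars-level pick fold is the String-level pick fold, element for element
theorem fold_map (t : List String) (w : String) :
    (t.map String.toList).foldl (fun b x => if charsScore b < charsScore x then x else b) w.toList
      = (t.foldl (fun b x => if highScore b < highScore x then x else b) w).toList := by
  induction t generalizing w with
  | nil => rfl
  | cons x t ih =>
      simp only [List.map_cons, List.foldl_cons]
      by_cases h : charsScore w.toList < charsScore x.toList
      · simp only [highScore, if_pos h]; exact ih x
      · simp only [highScore, if_neg h]; exact ih w

-- A's index-of-max lookup produces the running-best word.
theorem index_max_eq (f : String → Int) (t : List String) (w : String) :
    (PySem.List.index? ((w :: t).map f) ((t.map f).foldl max (f w))).bind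
        (fun k => (w :: t)[k]?) =
      some (t.foldl (fun b x => if f b < f x then x else b) w) := by
  induction t generalizing w with
  | nil => simp [PySem.List.index?]
  | cons x t ih =>
      simp only [List.map_cons, List.foldl_cons]
      by_cases hwx : f w < f x
      · have hmax : max (f w) (f x) = f x := max_eq_right (le_of_lt hwx)
        have hle : f x ≤ (t.map f).foldl max (f x) := (PySem.List.le_foldl_max _ _).1
        have hne : f w ≠ (t.map f).foldl max (max (f w) (f x)) := by
          rw [hmax]; exact ne_of_lt (lt_of_lt_of_le hwx hle)
        rw [PySem.List.index?_cons_of_ne _ hne]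
        have := ih x
        rw [hmax]
        simp only [List.map_cons] at this
        rw [Option.bind_map] at *
        simpa [hwx, Function.comp] using this
      · have hmax : max (f w) (f x) = f w := max_eq_left (le_of_not_gt hwx)
        rw [hmax]
        have := ih w
        simp only [List.map_cons] at this
        set M := ((t.map f).foldl max (f w)) with hM
        by_cases hwM : f w = M
        · rw [← hwM]
          rw [PySem.List.index?_cons_self]
          rw [← hwM, PySem.List.index?_cons_self] at this
          simp only [Option.bind_some] at this ⊢
          simp only [List.getElem?_cons_zero] at this ⊢
          have hpick : t.foldl (fun b x => if f b < f x then x else b) w = w := by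
            simpa using this.symm
          simp [hwx, hpick]
        · have hxM : f x ≠ M := by
            intro h
            have hfwM : f w ≤ M := by
              have := (PySem.List.le_foldl_max (t.map f) (f w)).1; rw [← hM] at this; exact this
            have : f x ≤ f w := le_of_not_gt hwx
            omega
          rw [PySem.List.index?_cons_of_ne _ hwM]
          rw [PySem.List.index?_cons_of_ne _ hxM]
          rw [PySem.List.index?_cons_of_ne _ hwM] at this
          rw [Option.bind_map] at this ⊢
          rw [Option.bind_map]
          simp only [Function.comp, List.getElem?_cons_succ] at this ⊢
          simpa [hwx] using this

theorem high_eq (x : String) (h : Pre_high x) : high x = high_alt x := by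
  obtain ⟨w, t, hws⟩ : ∃ w t, PySem.Str.split₀ x = w :: t := by
    cases hsp : PySem.Str.split₀ x with
    | nil => exact absurd hsp h
    | cons a b => exact ⟨a, b, rfl⟩
  -- the common value: the first word of maximal score
  set W := t.foldl (fun b x => if highScore b < highScore x then x else b) w with hW
  -- A's side
  have ha : high x = W := by
    unfold high
    rw [hws]
    simp only [PySem.List.foldl_append_singleton_eq_map, List.nil_append]
    have hf : (fun (i : String) => i.toList.foldl (fun s l => s + ((l.toNat : Int) - 96)) 0)
        = highScore := funext score_eq
    rw [hf]
    simp only [List.map_cons]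
    rw [PySem.List.max?_id_cons]
    have := index_max_eq highScore t w
    cases hidx : PySem.List.index? ((w :: t).map highScore) ((t.map highScore).foldl max (highScore w)) with
    | none => rw [hidx] at this; simp at this
    | some k =>
        rw [hidx] at this
        simp only [Option.bind_some] at this
        simp only [List.map_cons] at hidx ⊢
        rw [hidx]
        simp only [PySem.List.pyGet?_natCast, this, Option.getD_some, hW]
  -- B's side
  have hwords : PySem.Chars.split₀ x.toList = w.toList :: t.map String.toList := by
    rw [← PySem.Str.split₀_map_toList, hws, List.map_cons]
  have hb : high_alt x = W := by
    unfold high_alt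
    have h0 : (none, ([] : List Char), (0 : Int))
        = ((none : Option (Int × List Char)), ([] : List Char), charsScore []) := by
      simp [charsScore_nil]
    rw [h0, scan_eq, ← split₀_eq_wordsFrom, hwords]
    simp only [runBest]
    rw [runBest_some, fold_map]
    simp [hW]
  rw [ha, hb]

-- ===== VERDICT (by name: the statement is the Claim_ definition above) =====
theorem high_spec : Claim_equal_high := by
  intro x _ hpre
  exact high_eq x hpre
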